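-- pv_equiv track=rewrite | github.com/grapheneaffiliate/h4-polytopic-attention | solve_arc1_recovery.py | solve_a699fb00
-- ===== SOURCE A (Python) =====
-- def solve_a699fb00(grid):
--     """Fill between 1s on same row with 2s."""
--     rows, cols = len(grid), len(grid[0])
--     out = [row[:] for row in grid]
--     for r in range(rows):
--         ones = [c for c in range(cols) if grid[r][c] == 1]
--         if len(ones) >= 2:
--             start, end = ones[0], ones[-1]
--             for c in range(start+1, end):
--                 if grid[r][c] == 0:
--                     out[r][c] = 2
--     return out
-- ===== SOURCE B (Python) =====
-- def solve_a699fb00(grid):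
--     """Fill zeros lying between 1s of the same row with 2s."""
--     rows, cols = len(grid), len(grid[0])
--     out = [row[:] for row in grid]
--     for r in range(rows):
--         seen_one = False
--         pending = []
--         for c in range(cols):
--             v = grid[r][c]
--             if v == 1:
--                 for p in pending:
--                     out[r][p] = 2
--                 pending = []
--                 seen_one = True
--             elif v == 0 and seen_one:
--                 pending.append(c)
--     return out
-- ===== Notes on version B (the rewrite author's own statement) =====
-- stated objective: alternative
-- what changed: Replaces A's per-row collect-the-1-positions-then-rescan-the-interior pass by one forward pass per row that records pending zero columns after a 1 and writes them as 2 each time another 1 appears; pending zeros after the last 1 are never written, so no 1-position list and no second scan is needed.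
import Mathlib
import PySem

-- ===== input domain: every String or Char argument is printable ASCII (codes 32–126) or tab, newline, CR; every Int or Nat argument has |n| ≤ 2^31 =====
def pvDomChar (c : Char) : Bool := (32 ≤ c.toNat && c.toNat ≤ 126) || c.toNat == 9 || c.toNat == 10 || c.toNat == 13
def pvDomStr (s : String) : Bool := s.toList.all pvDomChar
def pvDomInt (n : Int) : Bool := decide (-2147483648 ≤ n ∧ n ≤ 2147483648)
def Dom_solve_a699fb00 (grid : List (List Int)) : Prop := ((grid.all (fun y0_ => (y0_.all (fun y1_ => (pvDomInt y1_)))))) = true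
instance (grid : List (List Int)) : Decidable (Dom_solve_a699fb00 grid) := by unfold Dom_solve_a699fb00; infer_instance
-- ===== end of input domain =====

-- B replaces A's per-row collect-the-1-positions-then-rescan-the-interior pass by one forward
-- pass per row buffering pending zero columns and writing them as 2 at each new 1;
-- objective: alternative decomposition of the same O(rows·cols) work.

-- ===== PORT A =====
-- per-row body of A: ones = [c for c in range(cols) if grid[r][c]==1]; if ≥2, set out[r][c]=2 for
-- c in range(start+1,end) with grid[r][c]==0.  Indices are Nats (Python's are nonnegative here);
-- `row.getD c 0` is exact for grid[r][c] since Pre_ gives c < cols = len(row);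
-- List.range' (s+1) (e-(s+1)) is exact for range(start+1, end) (empty when end ≤ start+1).
def aRow (row : List Int) (cols : Nat) : List Int :=
  let ones := (List.range cols).filter (fun c => row.getD c 0 = 1)
  if 2 ≤ ones.length then
    let s := ones.headD 0
    let e := (ones.getLast?).getD 0
    (List.range' (s + 1) (e - (s + 1))).foldl
      (fun o c => if row.getD c 0 = 0 then o.set c 2 else o) row
  else row

-- A's outer loop mutates out[r] (a copy of row r) independently per row: a map over rows.
def solve_a699fb00 (grid : List (List Int)) : List (List Int) :=
  let cols := (grid.headD []).length
  grid.map (fun row => aRow row cols)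

-- ===== PORT B =====
-- B's inner loop over the column indices c ∈ range(cols): out is the mutated copy of the row,
-- pending the buffered zero columns, seen whether a 1 occurred yet; `row.getD c 0` is exact for
-- grid[r][c] since Pre_ gives c < cols ≤ len(row).
def bGo (row : List Int) (cs : List Nat) (out : List Int) (pending : List Nat) (seen : Bool) : List Int :=
  match cs with
  | [] => out
  | c :: rest =>
    if row.getD c 0 = 1 then bGo row rest (pending.foldl (fun o p => o.set p 2) out) [] true
    else if row.getD c 0 = 0 ∧ seen = true then bGo row rest out (pending ++ [c]) seen
    else bGo row rest out pending seen

def solve_a699fb00_alt (grid : List (List Int)) : List (List Int) :=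
  let cols := (grid.headD []).length
  grid.map (fun row => bGo row (List.range cols) row [] false)

-- ===== PRECONDITION & SPEC =====
-- A raises IndexError on the empty grid (grid[0]) and whenever some row is shorter than the
-- first row (grid[r][c] with c up to len(grid[0])-1); Pre_ excludes exactly those inputs.
def Pre_solve_a699fb00 (grid : List (List Int)) : Prop :=
  grid ≠ [] ∧ ∀ row ∈ grid, (grid.headD []).length ≤ row.length

instance (grid : List (List Int)) : Decidable (Pre_solve_a699fb00 grid) := by
  unfold Pre_solve_a699fb00; infer_instance

def pvWitness_solve_a699fb00 : List (List Int) := [[1, 0, 3, 0, 1], [0, 1, 1, 0, 0]]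

def Spec_solve_a699fb00 (grid : List (List Int)) (out : List (List Int)) : Prop := out = solve_a699fb00_alt grid
instance (grid : List (List Int)) (out : List (List Int)) : Decidable (Spec_solve_a699fb00 grid out) := by unfold Spec_solve_a699fb00; infer_instance

-- ===== CLAIM (what is proved, stated in full; the proofs are below) =====
def Claim_equal_solve_a699fb00 : Prop := ∀ (grid : List (List Int)), Dom_solve_a699fb00 grid → Pre_solve_a699fb00 grid → Spec_solve_a699fb00 grid (solve_a699fb00 grid)

-- ===== LEMMAS AND PROOFS =====

-- the common pointwise description: position k becomes 2 iff it holds a 0 with a 1 somewhere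
-- before it and a 1 somewhere after it (within the first `cols` columns)
abbrev Fills (row : List Int) (cols k : Nat) : Prop :=
  row.getD k 0 = 0 ∧ (∃ i, i < k ∧ i < cols ∧ row.getD i 0 = 1) ∧
    (∃ j, j < cols ∧ k < j ∧ row.getD j 0 = 1)

theorem getD_set (o : List Int) (c k : Nat) (a : Int) :
    (o.set c a).getD k 0 = if c = k ∧ c < o.length then a else o.getD k 0 := by
  rw [List.getD, List.getD, List.getElem?_set]
  by_cases h : c = k
  · subst h; by_cases hl : c < o.length <;> simp [hl]
  · simp [h]

theorem foldl_set_length (cs : List Nat) (row o : List Int) :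
    (cs.foldl (fun o c => if row.getD c 0 = 0 then o.set c 2 else o) o).length = o.length := by
  induction cs generalizing o with
  | nil => rfl
  | cons c cs ih => simp only [List.foldl_cons]; rw [ih]; split <;> simp

theorem foldl_set_getD (cs : List Nat) (row o : List Int) (k : Nat) :
    (cs.foldl (fun o c => if row.getD c 0 = 0 then o.set c 2 else o) o).getD k 0 =
      if k ∈ cs ∧ row.getD k 0 = 0 ∧ k < o.length then 2 else o.getD k 0 := by
  induction cs generalizing o with
  | nil => simp
  | cons c cs ih =>
    simp only [List.foldl_cons]
    rw [ih]
    have hlen : (if row.getD c 0 = 0 then o.set c 2 else o).length = o.length := by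
      split <;> simp
    have hgd : (if row.getD c 0 = 0 then o.set c 2 else o).getD k 0 =
        if c = k ∧ row.getD k 0 = 0 ∧ k < o.length then 2 else o.getD k 0 := by
      by_cases hck : c = k
      · subst hck
        by_cases h0 : row.getD c 0 = 0
        · rw [if_pos h0, getD_set]
          by_cases hl : c < o.length
          · rw [if_pos ⟨rfl, hl⟩, if_pos ⟨rfl, h0, hl⟩]
          · rw [if_neg (by tauto), if_neg (by tauto)]
        · rw [if_neg h0, if_neg (by tauto)]
      · by_cases h0 : row.getD c 0 = 0
        · rw [if_pos h0, getD_set, if_neg (by tauto), if_neg (by tauto)]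
        · rw [if_neg h0, if_neg (by tauto)]
    rw [hlen, hgd]
    by_cases hP : row.getD k 0 = 0 ∧ k < o.length
    · by_cases hmem : k ∈ cs
      · rw [if_pos ⟨hmem, hP⟩, if_pos ⟨List.mem_cons_of_mem _ hmem, hP⟩]
      · rw [if_neg (by tauto)]
        by_cases hck : c = k
        · rw [if_pos ⟨hck, hP⟩, if_pos ⟨List.mem_cons.mpr (Or.inl hck.symm), hP⟩]
        · rw [if_neg (by tauto), if_neg (by rw [List.mem_cons]; tauto)]
    · rw [if_neg (by tauto), if_neg (by tauto), if_neg (by tauto)]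

theorem pairwise_headD_le (a : Nat) (rest : List Nat)
    (h : (a :: rest).Pairwise (· < ·)) (m : Nat) (hm : m ∈ a :: rest) : a ≤ m := by
  rcases List.mem_cons.mp hm with rfl | hm
  · exact Nat.le_refl _
  · exact Nat.le_of_lt ((List.pairwise_cons.mp h).1 m hm)

theorem pairwise_le_getLast :
    ∀ (l : List Nat), l.Pairwise (· < ·) → ∀ m ∈ l, m ≤ (l.getLast?).getD 0 := by
  intro l
  induction l with
  | nil => intro _ m hm; cases hm
  | cons a rest ih =>
    intro h m hm
    cases rest with
    | nil => simp at hm; simp [hm]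
    | cons b t =>
      rw [List.getLast?_cons_cons]
      rcases List.mem_cons.mp hm with rfl | hm'
      · have hb : m < b := (List.pairwise_cons.mp h).1 b (by simp)
        exact Nat.le_trans (Nat.le_of_lt hb) (ih (List.pairwise_cons.mp h).2 b (by simp))
      · exact ih (List.pairwise_cons.mp h).2 m hm'

theorem getLast?_getD_mem (l : List Nat) (hne : l ≠ []) : (l.getLast?).getD 0 ∈ l := by
  rw [List.getLast?_eq_some_getLast hne]
  exact List.getLast_mem hne

theorem ones_mem_iff (row : List Int) (cols m : Nat) :
    m ∈ (List.range cols).filter (fun c => row.getD c 0 = 1) ↔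
      m < cols ∧ row.getD m 0 = 1 := by
  simp [List.mem_filter, List.mem_range]

theorem ones_pairwise (row : List Int) (cols : Nat) :
    ((List.range cols).filter (fun c => row.getD c 0 = 1)).Pairwise (· < ·) :=
  (List.pairwise_lt_range).filter _

-- A's per-row result, pointwise
theorem aRow_getD (row : List Int) (cols k : Nat) (hc : cols ≤ row.length) :
    (aRow row cols).getD k 0 = if Fills row cols k then 2 else row.getD k 0 := by
  unfold aRow
  set ones := (List.range cols).filter (fun c => row.getD c 0 = 1) with hones
  by_cases h2 : 2 ≤ ones.length
  · rw [if_pos h2]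
    set s := ones.headD 0 with hs
    set e := (ones.getLast?).getD 0 with he
    have hne : ones ≠ [] := by
      intro h; rw [h] at h2; exact absurd h2 (by decide)
    obtain ⟨a, rest, hcons⟩ := List.exists_cons_of_ne_nil hne
    have hsa : s = a := by rw [hs, hcons]; rfl
    have hsmem : s ∈ ones := by rw [hsa, hcons]; exact List.mem_cons_self
    have hemem : e ∈ ones := getLast?_getD_mem ones hne
    have hsle : ∀ m ∈ ones, s ≤ m := by
      intro m hm; rw [hsa]; rw [hcons] at hm
      exact pairwise_headD_le a rest (hcons ▸ ones_pairwise row cols) m hm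
    have hle : ∀ m ∈ ones, m ≤ e := fun m hm =>
      pairwise_le_getLast ones (ones_pairwise row cols) m hm
    rw [foldl_set_getD]
    have hmem_iff : k ∈ List.range' (s + 1) (e - (s + 1)) ↔ s + 1 ≤ k ∧ k < s + 1 + (e - (s + 1)) :=
      List.mem_range'_1
    by_cases hF : Fills row cols k
    · rw [if_pos hF, if_pos]
      obtain ⟨h0, ⟨i, hik, hic, hi1⟩, ⟨j, hjc, hkj, hj1⟩⟩ := hF
      have hi : i ∈ ones := (ones_mem_iff row cols i).mpr ⟨hic, hi1⟩
      have hj : j ∈ ones := (ones_mem_iff row cols j).mpr ⟨hjc, hj1⟩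
      have hsk : s < k := Nat.lt_of_le_of_lt (hsle i hi) hik
      have hke : k < e := Nat.lt_of_lt_of_le hkj (hle j hj)
      have hecols : e < cols := ((ones_mem_iff row cols e).mp hemem).1
      exact ⟨hmem_iff.mpr (by omega), h0, by omega⟩
    · rw [if_neg hF, if_neg]
      rintro ⟨hmem, h0, hkl⟩
      have hk := hmem_iff.mp hmem
      have hscols : s < cols := ((ones_mem_iff row cols s).mp hsmem).1
      have hs1 : row.getD s 0 = 1 := ((ones_mem_iff row cols s).mp hsmem).2
      have hecols : e < cols := ((ones_mem_iff row cols e).mp hemem).1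
      have he1 : row.getD e 0 = 1 := ((ones_mem_iff row cols e).mp hemem).2
      exact hF ⟨h0, ⟨s, by omega, hscols, hs1⟩, ⟨e, hecols, by omega, he1⟩⟩
  · rw [if_neg h2]
    rw [if_neg]
    rintro ⟨h0, ⟨i, hik, hic, hi1⟩, ⟨j, hjc, hkj, hj1⟩⟩
    have hi : i ∈ ones := (ones_mem_iff row cols i).mpr ⟨hic, hi1⟩
    have hj : j ∈ ones := (ones_mem_iff row cols j).mpr ⟨hjc, hj1⟩
    apply h2
    match h : ones, hi, hj with
    | [], hi, _ => cases hi
    | [x], hi, hj => simp at hi hj; omega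
    | x :: y :: t, _, _ => simp

-- ---- B side ----

-- the columns B eventually writes as 2 while scanning the index list cs
def fillsList (row : List Int) (cs : List Nat) (seen : Bool) : List Nat :=
  match cs with
  | [] => []
  | c :: rest =>
    if row.getD c 0 = 1 then fillsList row rest true
    else if row.getD c 0 = 0 ∧ seen = true ∧ ∃ c' ∈ rest, row.getD c' 0 = 1 then
      c :: fillsList row rest seen
    else fillsList row rest seen

theorem setAll_length (cs : List Nat) (o : List Int) :
    (cs.foldl (fun o p => o.set p 2) o).length = o.length := by
  induction cs generalizing o with
  | nil => rfl
  | cons c cs ih => simp only [List.foldl_cons]; rw [ih]; simp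

theorem setAll_getD (cs : List Nat) (o : List Int) (k : Nat) :
    (cs.foldl (fun o p => o.set p 2) o).getD k 0 =
      if k ∈ cs ∧ k < o.length then 2 else o.getD k 0 := by
  induction cs generalizing o with
  | nil => simp
  | cons c cs ih =>
    simp only [List.foldl_cons]
    rw [ih]
    simp only [List.length_set]
    rw [getD_set]
    by_cases hkl : k < o.length
    · by_cases hmem : k ∈ cs
      · rw [if_pos ⟨hmem, hkl⟩, if_pos ⟨List.mem_cons_of_mem _ hmem, hkl⟩]
      · rw [if_neg (by tauto)]
        by_cases hck : c = k
        · rw [if_pos ⟨hck, hck ▸ hkl⟩, if_pos ⟨List.mem_cons.mpr (Or.inl hck.symm), hkl⟩]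
        · rw [if_neg (by tauto), if_neg (by rw [List.mem_cons]; tauto)]
    · rw [if_neg (by tauto), if_neg (by rintro ⟨rfl, h⟩; exact hkl h), if_neg (by tauto)]

theorem bGo_eq (cs : List Nat) (row : List Int) (out : List Int) (pending : List Nat)
    (seen : Bool) :
    bGo row cs out pending seen =
      ((if ∃ c ∈ cs, row.getD c 0 = 1 then pending else []) ++ fillsList row cs seen).foldl
        (fun o p => o.set p 2) out := by
  induction cs generalizing out pending seen with
  | nil => simp [bGo, fillsList]
  | cons c rest ih =>
    by_cases hv : row.getD c 0 = 1
    · rw [show bGo row (c :: rest) out pending seen =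
        bGo row rest (pending.foldl (fun o p => o.set p 2) out) [] true from by
          simp only [bGo]; rw [if_pos hv]]
      rw [ih]
      rw [show fillsList row (c :: rest) seen = fillsList row rest true from by
        rw [fillsList]; rw [if_pos hv]]
      rw [if_pos (show ∃ x ∈ c :: rest, row.getD x 0 = 1 from ⟨c, List.mem_cons.mpr (Or.inl rfl), hv⟩), ← List.foldl_append]
      congr 1
      split <;> simp
    · have hmem : (∃ c' ∈ c :: rest, row.getD c' 0 = 1) ↔ (∃ c' ∈ rest, row.getD c' 0 = 1) := by
        constructor
        · rintro ⟨c', hc', h1⟩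
          rcases List.mem_cons.mp hc' with rfl | hc'
          · exact absurd h1 hv
          · exact ⟨c', hc', h1⟩
        · rintro ⟨c', hc', h1⟩
          exact ⟨c', List.mem_cons_of_mem _ hc', h1⟩
      by_cases hc : row.getD c 0 = 0 ∧ seen = true
      · rw [show bGo row (c :: rest) out pending seen = bGo row rest out (pending ++ [c]) seen
          from by simp only [bGo]; rw [if_neg hv, if_pos hc]]
        rw [ih]
        rw [show fillsList row (c :: rest) seen =
          (if row.getD c 0 = 0 ∧ seen = true ∧ ∃ c' ∈ rest, row.getD c' 0 = 1 then
            c :: fillsList row rest seen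
           else fillsList row rest seen) from by rw [fillsList]; rw [if_neg hv]]
        by_cases hr : ∃ c' ∈ rest, row.getD c' 0 = 1
        · rw [if_pos hr, if_pos (hmem.mpr hr), if_pos ⟨hc.1, hc.2, hr⟩]
          simp
        · rw [if_neg hr, if_neg (by rw [hmem]; exact hr),
            if_neg (by rintro ⟨_, _, h⟩; exact hr h)]
      · rw [show bGo row (c :: rest) out pending seen = bGo row rest out pending seen from by
          simp only [bGo]; rw [if_neg hv, if_neg hc]]
        rw [ih]
        rw [show fillsList row (c :: rest) seen = fillsList row rest seen from by
          rw [fillsList]; rw [if_neg hv, if_neg (by tauto)]]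
        rw [if_congr hmem rfl rfl]

theorem exists_range'_iff (row : List Int) (n m : Nat) :
    (∃ c ∈ List.range' n m, row.getD c 0 = 1) ↔ ∃ j, n ≤ j ∧ j < n + m ∧ row.getD j 0 = 1 := by
  constructor
  · rintro ⟨c, hc, h1⟩
    have := List.mem_range'_1.mp hc
    exact ⟨c, this.1, by omega, h1⟩
  · rintro ⟨j, h1, h2, h3⟩
    exact ⟨j, List.mem_range'_1.mpr ⟨h1, by omega⟩, h3⟩

theorem mem_fillsList (row : List Int) (m n k : Nat) (seen : Bool) :
    k ∈ fillsList row (List.range' n m) seen ↔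
      n ≤ k ∧ k < n + m ∧ row.getD k 0 = 0 ∧
      (seen = true ∨ ∃ i, n ≤ i ∧ i < k ∧ row.getD i 0 = 1) ∧
      (∃ j, k < j ∧ j < n + m ∧ row.getD j 0 = 1) := by
  induction m generalizing n seen with
  | zero => simp [fillsList]; omega
  | succ m' ih =>
    rw [List.range'_succ]
    by_cases hv : row.getD n 0 = 1
    · rw [show fillsList row (n :: List.range' (n + 1) m') seen =
        fillsList row (List.range' (n + 1) m') true from by rw [fillsList]; rw [if_pos hv]]
      rw [ih]
      constructor
      · rintro ⟨h1, h2, h0, _, j, hj1, hj2, hj3⟩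
        exact ⟨by omega, by omega, h0, Or.inr ⟨n, by omega, by omega, hv⟩,
          ⟨j, hj1, by omega, hj3⟩⟩
      · rintro ⟨h1, h2, h0, hsi, j, hj1, hj2, hj3⟩
        have hkn : n < k := by
          rcases Nat.lt_or_ge n k with h | h
          · exact h
          · exfalso
            have h0' := h0
            rw [show k = n from by omega, hv] at h0'
            exact absurd h0' (by decide)
        refine ⟨by omega, by omega, h0, Or.inl rfl, ?_⟩
        exact ⟨j, hj1, by omega, hj3⟩
    · have hshift : k ∈ fillsList row (List.range' (n + 1) m') seen ↔
          n + 1 ≤ k ∧ k < n + (m' + 1) ∧ row.getD k 0 = 0 ∧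
          (seen = true ∨ ∃ i, n ≤ i ∧ i < k ∧ row.getD i 0 = 1) ∧
          (∃ j, k < j ∧ j < n + (m' + 1) ∧ row.getD j 0 = 1) := by
        rw [ih]
        constructor
        · rintro ⟨h1, h2, h0, hsi, j, hj1, hj2, hj3⟩
          refine ⟨h1, by omega, h0, ?_, ⟨j, hj1, by omega, hj3⟩⟩
          rcases hsi with hs | ⟨i, hi1, hi2, hi3⟩
          · exact Or.inl hs
          · exact Or.inr ⟨i, by omega, hi2, hi3⟩
        · rintro ⟨h1, h2, h0, hsi, j, hj1, hj2, hj3⟩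
          refine ⟨h1, by omega, h0, ?_, ⟨j, hj1, by omega, hj3⟩⟩
          rcases hsi with hs | ⟨i, hi1, hi2, hi3⟩
          · exact Or.inl hs
          · rcases Nat.lt_or_ge i (n + 1) with h | h
            · have : i = n := by omega
              exact absurd (this ▸ hi3) hv
            · exact Or.inr ⟨i, h, hi2, hi3⟩
      by_cases hc : row.getD n 0 = 0 ∧ seen = true ∧
          ∃ c' ∈ List.range' (n + 1) m', row.getD c' 0 = 1
      · rw [show fillsList row (n :: List.range' (n + 1) m') seen =
          n :: fillsList row (List.range' (n + 1) m') seen from by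
            rw [fillsList]; rw [if_neg hv, if_pos hc]]
        obtain ⟨h0, hs, hr⟩ := hc
        obtain ⟨j', hj1', hj2', hj3'⟩ := (exists_range'_iff row (n + 1) m').mp hr
        rw [List.mem_cons, hshift]
        constructor
        · rintro (rfl | h)
          · exact ⟨by omega, by omega, h0, Or.inl hs, ⟨j', by omega, by omega, hj3'⟩⟩
          · exact ⟨by omega, h.2.1, h.2.2.1, h.2.2.2.1, h.2.2.2.2⟩
        · rintro ⟨h1, h2, h0', hsi, hj⟩
          rcases Nat.lt_or_ge n k with hnk | hnk
          · exact Or.inr ⟨by omega, h2, h0', hsi, hj⟩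
          · exact Or.inl (by omega)
      · rw [show fillsList row (n :: List.range' (n + 1) m') seen =
          fillsList row (List.range' (n + 1) m') seen from by
            rw [fillsList]; rw [if_neg hv, if_neg hc]]
        rw [hshift]
        constructor
        · rintro ⟨h1, h2, h0, hsi, hj⟩
          exact ⟨by omega, h2, h0, hsi, hj⟩
        · rintro ⟨h1, h2, h0, hsi, j, hj1, hj2, hj3⟩
          rcases Nat.lt_or_ge n k with hnk | hnk
          · exact ⟨by omega, h2, h0, hsi, j, hj1, hj2, hj3⟩
          · exfalso
            have hkn : k = n := by omega
            subst hkn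
            apply hc
            refine ⟨h0, ?_, ?_⟩
            · rcases hsi with hs | ⟨i, hi1, hi2, _⟩
              · exact hs
              · omega
            · exact (exists_range'_iff row (k + 1) m').mpr ⟨j, by omega, by omega, hj3⟩

-- B's per-row result, pointwise, within the first cols columns
theorem bRow_getD (row : List Int) (cols k : Nat) (hc : cols ≤ row.length) :
    (bGo row (List.range cols) row [] false).getD k 0 =
      if Fills row cols k then 2 else row.getD k 0 := by
  rw [bGo_eq]
  rw [show (if ∃ c ∈ List.range cols, row.getD c 0 = 1 then ([] : List Nat) else []) = []
    from by split <;> rfl]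
  rw [List.nil_append, setAll_getD, List.range_eq_range']
  by_cases hF : Fills row cols k
  · rw [if_pos hF, if_pos]
    obtain ⟨h0, ⟨i, hik, hic, hi1⟩, ⟨j, hjc, hkj, hj1⟩⟩ := hF
    have hk : k < cols := by omega
    exact ⟨(mem_fillsList row cols 0 k false).mpr
      ⟨by omega, by omega, h0, Or.inr ⟨i, by omega, hik, hi1⟩, ⟨j, hkj, by omega, hj1⟩⟩,
      by omega⟩
  · rw [if_neg hF, if_neg]
    rintro ⟨hmem, hkl⟩
    obtain ⟨h1, h2, h0, hsi, j, hj1, hj2, hj3⟩ := (mem_fillsList row cols 0 k false).mp hmem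
    apply hF
    refine ⟨h0, ?_, ⟨j, by omega, hj1, hj3⟩⟩
    rcases hsi with hs | ⟨i, hi1, hi2, hi3⟩
    · cases hs
    · exact ⟨i, hi2, by omega, hi3⟩

theorem row_eq (row : List Int) (cols : Nat) (hc : cols ≤ row.length) :
    aRow row cols = bGo row (List.range cols) row [] false := by
  have hlen : (aRow row cols).length = (bGo row (List.range cols) row [] false).length := by
    rw [bGo_eq]
    rw [show (if ∃ c ∈ List.range cols, row.getD c 0 = 1 then ([] : List Nat) else []) = []
      from by split <;> rfl]
    rw [List.nil_append, setAll_length]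
    simp only [aRow]
    split
    · exact foldl_set_length _ _ _
    · rfl
  apply List.ext_getElem hlen
  intro i h1 h2
  have ha := aRow_getD row cols i hc
  have hb := bRow_getD row cols i hc
  rw [List.getD_eq_getElem _ 0 h1] at ha
  rw [List.getD_eq_getElem _ 0 h2] at hb
  rw [ha, hb]

-- ===== VERDICT (by name: the statement is the Claim_ definition above) =====
theorem solve_a699fb00_spec : Claim_equal_solve_a699fb00 := by
  intro grid _ hpre
  unfold Spec_solve_a699fb00 solve_a699fb00 solve_a699fb00_alt
  apply List.map_congr_left
  intro row hrow
  exact row_eq row _ (hpre.2 row hrow)
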